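-- pv_equiv track=rewrite | github.com/wuwumaciek/WFAIS-Python | 31.10.2023 - zadanie zestaw 4/Zadanie31.10.py | prostokat
-- ===== SOURCE A (Python) =====
-- def prostokat(a, b):
--     s = ""
--     for i in range(a):
--         for y in range(b):
--             s = s + "+---"
--         s = s + "+\n"
--         for y in range(b):
--             s = s + "|   "
--         s = s + "|\n"
--     for y in range(b):
--         s = s + "+---"
--     s = s + "+"
--     return s
-- ===== SOURCE B (Python) =====
-- def prostokat(a, b):
--     border = "+---" * b + "+"
--     content = "|   " * b + "|"
--     return "\n".join([border, content] * a + [border])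
-- ===== Notes on version B (the rewrite author's own statement) =====
-- stated objective: simpler
-- what changed: Precomputes the two row strings once and assembles the grid as '\n'.join of a list of full rows, instead of appending '+---'/'| ' cell by cell into a string accumulator with nested loops.
import Mathlib
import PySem

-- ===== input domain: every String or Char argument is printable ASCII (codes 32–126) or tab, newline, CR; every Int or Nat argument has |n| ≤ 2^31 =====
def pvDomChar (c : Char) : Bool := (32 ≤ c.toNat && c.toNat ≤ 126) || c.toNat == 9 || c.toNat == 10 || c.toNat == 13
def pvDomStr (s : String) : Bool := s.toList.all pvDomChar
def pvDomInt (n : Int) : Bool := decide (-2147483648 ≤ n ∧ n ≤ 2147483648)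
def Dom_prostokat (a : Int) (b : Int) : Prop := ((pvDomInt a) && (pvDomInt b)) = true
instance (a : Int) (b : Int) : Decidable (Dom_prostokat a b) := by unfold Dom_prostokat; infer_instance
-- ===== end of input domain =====

-- B precomputes the two row strings once and joins a list of full rows with '\n',
-- replacing A's nested cell-by-cell string accumulation (objective: simpler).


-- ===== PORT A =====
def prostokat (a : Int) (b : Int) : String :=
  let s : String := ""
  let s := (PySem.List.pyRange 0 a 1).foldl (fun s _ =>
    let s := (PySem.List.pyRange 0 b 1).foldl (fun s _ => s ++ "+---") s
    let s := s ++ "+\n"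
    let s := (PySem.List.pyRange 0 b 1).foldl (fun s _ => s ++ "|   ") s
    s ++ "|\n") s
  let s := (PySem.List.pyRange 0 b 1).foldl (fun s _ => s ++ "+---") s
  s ++ "+"

-- ===== PORT B =====
def prostokat_alt (a : Int) (b : Int) : String :=
  let border := String.join (List.replicate b.toNat "+---") ++ "+"
  let content := String.join (List.replicate b.toNat "|   ") ++ "|"
  PySem.Str.join "\n" (PySem.List.pyRepeat [border, content] a ++ [border])

-- ===== PRECONDITION & SPEC =====
def Spec_prostokat (a : Int) (b : Int) (out : String) : Prop := out = prostokat_alt a b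
instance (a : Int) (b : Int) (out : String) : Decidable (Spec_prostokat a b out) := by unfold Spec_prostokat; infer_instance

-- ===== CLAIM (what is proved, stated in full; the proofs are below) =====
def Claim_equal_prostokat : Prop := ∀ (a : Int) (b : Int), Dom_prostokat a b → Spec_prostokat a b (prostokat a b)

-- ===== LEMMAS AND PROOFS =====

-- a fold that appends the constant string t once per element
theorem foldl_append_const_toList (t : String) (l : List Int) :
    ∀ s : String, (l.foldl (fun s _ => s ++ t) s).toList
      = s.toList ++ (List.replicate l.length t.toList).flatten := by
  induction l with
  | nil => intro s; simp
  | cons x xs ih => intro s; simp [List.foldl_cons, ih, List.replicate_succ]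

-- A's outer loop: each iteration appends one fixed block
theorem outer_foldl_toList (b : Int) (l : List Int) :
    ∀ s : String,
      (l.foldl (fun s _ =>
        (((PySem.List.pyRange 0 b 1).foldl (fun s _ => s ++ "|   ")
          ((PySem.List.pyRange 0 b 1).foldl (fun s _ => s ++ "+---") s ++ "+\n")) ++ "|\n")) s).toList
      = s.toList ++ (List.replicate l.length
          ((List.replicate b.toNat "+---".toList).flatten ++ "+\n".toList
            ++ (List.replicate b.toNat "|   ".toList).flatten ++ "|\n".toList)).flatten := by
  induction l with
  | nil => intro s; simp
  | cons x xs ih =>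
    intro s
    rw [List.foldl_cons, ih]
    simp [foldl_append_const_toList, List.replicate_succ, List.append_assoc]

theorem join_blocks (bo co : List Char) (n : Nat) :
    PySem.Chars.join ['\n'] ((List.replicate n [bo, co]).flatten ++ [bo])
      = (List.replicate n (bo ++ ['\n'] ++ co ++ ['\n'])).flatten ++ bo := by
  induction n with
  | zero => simp [PySem.Chars.join_singleton]
  | succ n ih =>
    obtain ⟨q, rest, hq⟩ : ∃ q rest,
        (List.replicate n [bo, co]).flatten ++ [bo] = q :: rest := by
      cases h : (List.replicate n [bo, co]).flatten ++ [bo] with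
      | nil => simp at h
      | cons q rest => exact ⟨q, rest, rfl⟩
    have hshape : (List.replicate (n+1) [bo, co]).flatten ++ [bo]
        = bo :: co :: ((List.replicate n [bo, co]).flatten ++ [bo]) := by
      simp [List.replicate_succ]
    rw [hshape, hq, PySem.Chars.join_cons_cons, PySem.Chars.join_cons_cons, ← hq, ih]
    simp [List.replicate_succ, List.append_assoc]

-- ===== VERDICT (by name: the statement is the Claim_ definition above) =====
theorem prostokat_spec : Claim_equal_prostokat := by
  intro a b _
  show prostokat a b = prostokat_alt a b
  apply String.toList_inj.mp
  have hA : (prostokat a b).toList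
      = (List.replicate a.toNat
          ((List.replicate b.toNat "+---".toList).flatten ++ "+\n".toList
            ++ (List.replicate b.toNat "|   ".toList).flatten ++ "|\n".toList)).flatten
        ++ ((List.replicate b.toNat "+---".toList).flatten ++ "+".toList) := by
    unfold prostokat
    rw [String.toList_append, foldl_append_const_toList, outer_foldl_toList]
    simp [List.append_assoc]
  have hB : (prostokat_alt a b).toList
      = PySem.Chars.join ['\n']
          ((List.replicate a.toNat
              [(List.replicate b.toNat "+---".toList).flatten ++ "+".toList,
               (List.replicate b.toNat "|   ".toList).flatten ++ "|".toList]).flatten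
            ++ [(List.replicate b.toNat "+---".toList).flatten ++ "+".toList]) := by
    unfold prostokat_alt
    rw [PySem.Str.toList_join]
    simp [PySem.List.pyRepeat, String.toList_join]
  rw [hA, hB, join_blocks]
  simp [List.append_assoc]
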